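-- pv_equiv track=rewrite | github.com/Novavetwo/studies | medalhas_final_backup.py | categoria_generos_do_pais
-- ===== SOURCE A (Python) =====
-- def categoria_generos_do_pais(tabela: list[list[str]], linha: int, generos: list[str], pais: str) -> list[str]:
--     '''
--     Monta uma lista de elementos de acordo com a lista *tabela* dada, utilizando recursividade.
--     Se a linha verificada representa um elemento que já está na lista, esse elemento é ignorado.
--     Requer que linha seja len(tabela) - 1 e que *generos* seja uma lista vazia [] na primeira chamada.
--     Exemplo:
--     >>> categoria_generos_do_pais([['','','','','BRA','M'],['','','','','USA','W']], 1, [], 'BRA')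
--     ['M']
--     '''
--     if linha >= 0:
--         genero = tabela[linha][5]
--         if verificar_presenca(generos, genero) == False:
--             generos = categoria_generos_do_pais(tabela, linha - 1, generos, pais)
--             if tabela[linha][4] == pais:
--                 generos.append(genero)
--     return generos
--
-- def verificar_presenca(lst: list[str], elemento: str):
--     '''
--     Verifica se dado elemento está presente em determinada lista.
--     Exemplo:
--     >>> verificar_presenca(['1'], '1')
--     True
--     >>> verificar_presenca(['1'], '2')
--     False
--     '''
--     i = 0
--     resposta = False
--     while i < len(lst):
--         if lst[i] == elemento:
--             resposta = True
--         i = i + 1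
--     return resposta
-- ===== SOURCE B (Python) =====
-- def categoria_generos_do_pais(tabela: list[list[str]], linha: int, generos: list[str], pais: str) -> list[str]:
--     # Iterative version: walk rows from linha down to 0, stopping at the first
--     # gender already present in the initial *generos*; collect matching genders
--     # top-down in a temporary list, then extend *generos* with them reversed
--     # (bottom-up order), mutating and returning the same list object as A.
--     temp = []
--     row = linha
--     while row >= 0:
--         genero = tabela[row][5]
--         if genero in generos:
--             break
--         if tabela[row][4] == pais:
--             temp.append(genero)
--         row -= 1
--     generos.extend(reversed(temp))
--     return generos
-- ===== Notes on version B (the rewrite author's own statement) =====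
-- stated objective: simpler
-- what changed: Replaces the recursion over linha (with append-on-return and a full-scan membership helper) by a single iterative while loop that collects matching genders into a temporary list and extends generos once at the end; membership uses the short-circuiting 'in' operator.
-- outside the precondition, e.g. on categoria_generos_do_pais([['a'], ['', '', '', '', 'BRA', 'M']], 1, ['M'], 'BRA'): A returns ['M'], B returns ['M']
import Mathlib
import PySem

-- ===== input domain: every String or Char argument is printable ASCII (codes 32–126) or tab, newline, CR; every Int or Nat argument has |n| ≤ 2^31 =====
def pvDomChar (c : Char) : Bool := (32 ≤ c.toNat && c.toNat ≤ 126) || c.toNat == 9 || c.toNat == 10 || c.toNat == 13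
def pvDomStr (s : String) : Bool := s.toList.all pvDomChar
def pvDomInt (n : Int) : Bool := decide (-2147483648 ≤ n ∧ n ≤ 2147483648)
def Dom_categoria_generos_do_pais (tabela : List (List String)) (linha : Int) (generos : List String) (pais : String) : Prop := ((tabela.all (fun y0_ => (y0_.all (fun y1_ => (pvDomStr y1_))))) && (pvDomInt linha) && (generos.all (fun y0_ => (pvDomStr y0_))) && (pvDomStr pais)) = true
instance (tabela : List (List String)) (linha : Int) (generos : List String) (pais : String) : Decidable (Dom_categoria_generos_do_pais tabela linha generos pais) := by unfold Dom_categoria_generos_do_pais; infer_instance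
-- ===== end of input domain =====

-- B replaces A's recursion by one iterative descent loop plus a single extend (objective: simpler).
-- A mutates *generos* in place (appends); B performs the same mutation; the equivalence proved here is about the return value.

-- ===== PORT A =====
-- while loop over indices i = 0 .. len(lst)-1, last assignment wins (equivalent to any match)
def verificar_presenca (lst : List String) (elemento : String) : Bool :=
  (PySem.List.pyRange 0 (lst.length : Int) 1).foldl
    (fun resposta i => if PySem.List.pyGetD lst i "" == elemento then true else resposta) false

def categoria_generos_do_pais (tabela : List (List String)) (linha : Int) (generos : List String) (pais : String) : List String :=
  if _h : 0 ≤ linha then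
    -- tabela[linha][5]; out of range = IndexError, excluded by Pre_
    let genero := PySem.List.pyGetD (PySem.List.pyGetD tabela linha []) 5 ""
    if verificar_presenca generos genero == false then
      let generos' := categoria_generos_do_pais tabela (linha - 1) generos pais
      if PySem.List.pyGetD (PySem.List.pyGetD tabela linha []) 4 "" == pais then
        generos' ++ [genero]
      else generos'
    else generos
  else generos
termination_by (linha + 1).toNat
decreasing_by omega

-- ===== PORT B =====
-- the while loop: row descends from linha; temp collects matching genders top-down
def pvBLoop (tabela : List (List String)) (generos : List String) (pais : String) (row : Int) (temp : List String) : List String :=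
  if _h : 0 ≤ row then
    let genero := PySem.List.pyGetD (PySem.List.pyGetD tabela row []) 5 ""
    if generos.contains genero then temp   -- break
    else
      pvBLoop tabela generos pais (row - 1)
        (if PySem.List.pyGetD (PySem.List.pyGetD tabela row []) 4 "" == pais then temp ++ [genero] else temp)
  else temp
termination_by (row + 1).toNat
decreasing_by omega

def categoria_generos_do_pais_alt (tabela : List (List String)) (linha : Int) (generos : List String) (pais : String) : List String :=
  generos ++ (pvBLoop tabela generos pais linha []).reverse

-- ===== PRECONDITION & SPEC =====
-- Python A raises IndexError when its descent reaches tabela[row] with row ≥ len(tabela) or a row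
-- with fewer than 6 columns. For a closed form, Pre_ requires every row up to linha to have ≥ 6
-- columns — slightly narrower than strictly reached when the descent short-circuits early on a
-- gender already present in *generos* (see cites: A still returns on such excluded inputs).
def Pre_categoria_generos_do_pais (tabela : List (List String)) (linha : Int) (generos : List String) (pais : String) : Prop :=
  linha < (tabela.length : Int) ∧ (0 ≤ linha → ∀ r ∈ tabela.take (linha.toNat + 1), 6 ≤ r.length)
instance (tabela : List (List String)) (linha : Int) (generos : List String) (pais : String) : Decidable (Pre_categoria_generos_do_pais tabela linha generos pais) := by unfold Pre_categoria_generos_do_pais; infer_instance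

def pvWitness_categoria_generos_do_pais : List (List String) × Int × List String × String :=
  ([["", "", "", "", "BRA", "M"], ["", "", "", "", "USA", "W"]], 1, [], "BRA")

def Spec_categoria_generos_do_pais (tabela : List (List String)) (linha : Int) (generos : List String) (pais : String) (out : List String) : Prop := out = categoria_generos_do_pais_alt tabela linha generos pais
instance (tabela : List (List String)) (linha : Int) (generos : List String) (pais : String) (out : List String) : Decidable (Spec_categoria_generos_do_pais tabela linha generos pais out) := by unfold Spec_categoria_generos_do_pais; infer_instance

-- ===== CLAIM (what is proved, stated in full; the proofs are below) =====
def Claim_equal_categoria_generos_do_pais : Prop := ∀ (tabela : List (List String)) (linha : Int) (generos : List String) (pais : String), Dom_categoria_generos_do_pais tabela linha generos pais → Pre_categoria_generos_do_pais tabela linha generos pais → Spec_categoria_generos_do_pais tabela linha generos pais (categoria_generos_do_pais tabela linha generos pais)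

-- ===== LEMMAS AND PROOFS =====

-- A's membership helper decides list membership
theorem verificar_aux (lst : List String) (elemento : String) (n : Nat) (h : n ≤ lst.length) :
    (PySem.List.pyRange 0 (n : Int) 1).foldl
      (fun resposta i => if PySem.List.pyGetD lst i "" == elemento then true else resposta) false
    = decide (elemento ∈ lst.take n) := by
  induction n with
  | zero => simp [PySem.List.pyRange]
  | succ k ih =>
      rw [show ((k + 1 : Nat) : Int) = (k : Int) + 1 by push_cast; ring,
        PySem.List.pyRange_one_succ_right (by omega : (0:Int) ≤ (k:Int))]
      rw [List.foldl_append, ih (by omega)]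
      have hk : k < lst.length := by omega
      have hgd : PySem.List.pyGetD lst (k : Int) "" = lst[k] := by
        rw [PySem.List.pyGetD_natCast]; simp [List.getD, hk]
      simp only [List.foldl, hgd]
      have htake : lst.take (k + 1) = lst.take k ++ [lst[k]] := by
        rw [List.take_add_one]; simp [hk]
      by_cases hm : lst[k] == elemento
      · have he : lst[k] = elemento := eq_of_beq hm
        have hmem : elemento ∈ lst.take (k + 1) := by
          rw [htake, ← he]; exact List.mem_append_right _ (by simp)
        simp [hm, hmem]
      · have he : elemento ≠ lst[k] := fun heq => hm (by simp [heq])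
        have hiff : elemento ∈ lst.take (k + 1) ↔ elemento ∈ lst.take k := by
          constructor
          · intro hmem
            rcases List.mem_append.mp (htake ▸ hmem) with h1 | h1
            · exact h1
            · exact absurd (List.mem_singleton.mp h1) he
          · intro hmem; exact htake ▸ List.mem_append_left _ hmem
        rw [if_neg hm]
        simp [hiff]

theorem verificar_eq_mem (lst : List String) (elemento : String) :
    verificar_presenca lst elemento = decide (elemento ∈ lst) := by
  have := verificar_aux lst elemento lst.length le_rfl
  simpa [verificar_presenca] using this

-- the loop accumulator factors out
theorem pvBLoop_factor (tabela : List (List String)) (generos : List String) (pais : String) :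
    ∀ (n : Nat) (row : Int), (row + 1).toNat = n → ∀ temp,
      pvBLoop tabela generos pais row temp = temp ++ pvBLoop tabela generos pais row [] := by
  intro n
  induction n with
  | zero =>
      intro row hn temp
      have hneg : ¬ 0 ≤ row := by omega
      rw [pvBLoop, pvBLoop]; simp [hneg]
  | succ k ih =>
      intro row hn temp
      by_cases h0 : 0 ≤ row
      · have hk : (row - 1 + 1).toNat = k := by omega
        rw [pvBLoop, pvBLoop]
        simp only [h0, dif_pos]
        set g := PySem.List.pyGetD (PySem.List.pyGetD tabela row []) 5 "" with hg
        by_cases hc : g ∈ generos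
        · simp [hc]
        · by_cases hp : PySem.List.pyGetD (PySem.List.pyGetD tabela row []) 4 "" = pais
          · simp only [hc, hp, List.contains_eq_mem, decide_true, decide_false,
              Bool.false_eq_true, if_neg, if_pos, beq_self_eq_true, ite_true, ite_false]
            rw [ih (row - 1) hk (temp ++ [g]), ih (row - 1) hk ([] ++ [g])]
            simp [List.append_assoc]
          · simp only [hc, hp, List.contains_eq_mem, decide_true, decide_false,
              Bool.false_eq_true, if_neg, beq_iff_eq, ite_false]
            exact ih (row - 1) hk temp
      · rw [pvBLoop, pvBLoop]; simp [h0]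

-- A's recursion computes generos ++ reverse of the loop's collection
theorem main_aux (tabela : List (List String)) (generos : List String) (pais : String) :
    ∀ (n : Nat) (row : Int), (row + 1).toNat = n →
      categoria_generos_do_pais tabela row generos pais
        = generos ++ (pvBLoop tabela generos pais row []).reverse := by
  intro n
  induction n with
  | zero =>
      intro row hn
      have hneg : ¬ 0 ≤ row := by omega
      rw [categoria_generos_do_pais, pvBLoop]; simp [hneg]
  | succ k ih =>
      intro row hn
      by_cases h0 : 0 ≤ row
      · have hk : (row - 1 + 1).toNat = k := by omega
        rw [categoria_generos_do_pais, pvBLoop]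
        simp only [h0, dif_pos, verificar_eq_mem]
        set g := PySem.List.pyGetD (PySem.List.pyGetD tabela row []) 5 "" with hg
        by_cases hc : g ∈ generos
        · simp [hc]
        · by_cases hp : PySem.List.pyGetD (PySem.List.pyGetD tabela row []) 4 "" = pais
          · simp only [hc, hp, List.contains_eq_mem, decide_true, decide_false,
              Bool.false_eq_true, if_neg, if_pos, beq_self_eq_true, ite_true, ite_false]
            rw [ih (row - 1) hk, pvBLoop_factor tabela generos pais k (row - 1) hk ([] ++ [g])]
            simp [List.append_assoc]
          · simp only [hc, hp, List.contains_eq_mem, decide_true, decide_false,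
              Bool.false_eq_true, if_neg, beq_iff_eq, ite_false]
            exact ih (row - 1) hk
      · rw [categoria_generos_do_pais, pvBLoop]; simp [h0]

-- ===== VERDICT (by name: the statement is the Claim_ definition above) =====
theorem categoria_generos_do_pais_spec : Claim_equal_categoria_generos_do_pais := by
  intro tabela linha generos pais _hdom _hpre
  unfold Spec_categoria_generos_do_pais categoria_generos_do_pais_alt
  exact main_aux tabela generos pais (linha + 1).toNat linha rfl
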